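-- pv_equiv track=rewrite | github.com/ep-eaglepoint-ai/bd_datasets_002 | 7omc2o-parallel-data-processing/repository_before/main.py | generate_test_text
-- ===== SOURCE A (Python) =====
-- def generate_test_text(word_count):
--     sample_words = ["the", "quick", "brown", "fox", "jumps", "over", "lazy", "dog",
--                     "python", "programming", "parallel", "processing", "data", "analysis"]
--     text = ""
--     for i in range(word_count):
--         word = sample_words[i % len(sample_words)]
--         text = text + word + " "
--     return text
-- ===== SOURCE B (Python) =====
-- def generate_test_text(word_count):
--     sample_words = ["the", "quick", "brown", "fox", "jumps", "over", "lazy", "dog",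
--                     "python", "programming", "parallel", "processing", "data", "analysis"]
--     if word_count <= 0:
--         return ""
--     q, r = divmod(word_count, len(sample_words))
--     base = ''.join(w + ' ' for w in sample_words)
--     return base * q + ''.join(w + ' ' for w in sample_words[:r])
-- ===== Notes on version B (the rewrite author's own statement) =====
-- stated objective: faster
-- what changed: Replaces the flat modulo-indexed loop with quadratic string accumulation by one precomputed full-cycle string repeated q times (divmod) plus a joined partial tail.
import Mathlib
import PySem

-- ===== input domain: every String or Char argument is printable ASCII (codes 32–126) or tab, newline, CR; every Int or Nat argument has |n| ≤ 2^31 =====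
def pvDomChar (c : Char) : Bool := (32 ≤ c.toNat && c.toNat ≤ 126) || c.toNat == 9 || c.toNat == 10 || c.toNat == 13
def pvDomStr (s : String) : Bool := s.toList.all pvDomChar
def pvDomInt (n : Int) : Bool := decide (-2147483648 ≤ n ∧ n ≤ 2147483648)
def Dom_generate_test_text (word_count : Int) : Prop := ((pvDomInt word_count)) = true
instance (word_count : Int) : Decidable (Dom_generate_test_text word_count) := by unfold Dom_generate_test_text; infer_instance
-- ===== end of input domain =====

-- B replaces A's modulo-indexed accumulation loop with one precomputed full-cycle string
-- repeated (word_count // 14) times plus a joined partial tail (objective: faster, linear output build).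

-- shared literal: the sample_words list both Pythons declare
def pvSample : List String :=
  ["the", "quick", "brown", "fox", "jumps", "over", "lazy", "dog",
   "python", "programming", "parallel", "processing", "data", "analysis"]

-- ===== PORT A =====
-- the indexed access sample_words[i % 14] is always in range (0 ≤ i % 14 < 14), so pyGetD's default is never used
def generate_test_text (word_count : Int) : String :=
  (PySem.List.pyRange 0 word_count 1).foldl
    (fun text i => text ++ PySem.List.pyGetD pvSample (PySem.Int.mod i 14) "" ++ " ") ""

-- ===== PORT B =====
def generate_test_text_alt (word_count : Int) : String :=
  if word_count ≤ 0 then ""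
  else
    let n := word_count.toNat
    let base := String.join (pvSample.map (fun w => w ++ " "))
    String.join (List.replicate (n / 14) base)
      ++ String.join ((pvSample.take (n % 14)).map (fun w => w ++ " "))

-- ===== PRECONDITION & SPEC =====
def Spec_generate_test_text (word_count : Int) (out : String) : Prop := out = generate_test_text_alt word_count
instance (word_count : Int) (out : String) : Decidable (Spec_generate_test_text word_count out) := by unfold Spec_generate_test_text; infer_instance

-- ===== CLAIM (what is proved, stated in full; the proofs are below) =====
def Claim_equal_generate_test_text : Prop := ∀ (word_count : Int), Dom_generate_test_text word_count → Spec_generate_test_text word_count (generate_test_text word_count)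

-- ===== LEMMAS AND PROOFS =====

-- canonical recursive form of A's accumulation
def pvF : Nat → String
  | 0 => ""
  | k + 1 => pvF k ++ PySem.List.pyGetD pvSample (PySem.Int.mod (k : Int) 14) "" ++ " "

theorem pvF_succ (k : Nat) :
    pvF (k + 1) = pvF k ++ PySem.List.pyGetD pvSample (PySem.Int.mod (k : Int) 14) "" ++ " " := rfl

theorem pvA_eq_pvF (n : Nat) : generate_test_text (n : Int) = pvF n := by
  induction n with
  | zero => simp [generate_test_text, pvF, PySem.List.pyRange_one_eq_nil]
  | succ k ih =>
    have h : ((k + 1 : Nat) : Int) = (k : Int) + 1 := by push_cast; ring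
    unfold generate_test_text at ih ⊢
    rw [h, PySem.List.pyRange_one_succ_right (Int.natCast_nonneg k), List.foldl_append, ih]
    simp [pvF_succ]

theorem pvA_neg (n : Int) (h : n ≤ 0) : generate_test_text n = "" := by
  simp [generate_test_text, PySem.List.pyRange_one_eq_nil h]

def pvPartial (r : Nat) : String :=
  String.join ((pvSample.take r).map (fun w => w ++ " "))

theorem pv_join_foldl (l : List String) (s : String) :
    List.foldl (· ++ ·) s l = s ++ List.foldl (· ++ ·) "" l := by
  induction l generalizing s with
  | nil => simp
  | cons a t ih =>
    simp only [List.foldl_cons]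
    rw [ih (s ++ a), ih ("" ++ a)]
    simp [String.append_assoc]

theorem pv_join_append (l1 l2 : List String) :
    String.join (l1 ++ l2) = String.join l1 ++ String.join l2 := by
  simp only [String.join, List.foldl_append]
  exact pv_join_foldl l2 _

theorem pv_mod_lemma (q r : Nat) (hr : r < 14) :
    PySem.Int.mod ((14 * q + r : Nat) : Int) 14 = (r : Int) := by
  rw [PySem.Int.mod_eq_emod_of_pos (by norm_num)]
  push_cast
  omega

theorem pvPartial_succ (s : Nat) (hs : s < 14) :
    pvPartial (s + 1) = pvPartial s ++ (pvSample[s]'(by simp [pvSample]; omega) ++ " ") := by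
  have hlen : s < pvSample.length := by simp [pvSample]; omega
  have htake : pvSample.take (s + 1) = pvSample.take s ++ [pvSample[s]] := by
    rw [List.take_add_one, List.getElem?_eq_getElem hlen]; rfl
  unfold pvPartial
  rw [htake, List.map_append, pv_join_append]
  simp [String.join]

theorem pvF_split (r : Nat) (hr : r ≤ 14) (q : Nat) :
    pvF (14 * q + r) = pvF (14 * q) ++ pvPartial r := by
  induction r with
  | zero => simp [pvPartial, String.join]
  | succ s ih =>
    have hs : s < 14 := by omega
    have hlen : s < pvSample.length := by simp [pvSample]; omega
    have hget : PySem.List.pyGetD pvSample ((s : Int)) "" = pvSample[s] := by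
      rw [PySem.List.pyGetD_natCast]; exact List.getD_eq_getElem _ _ hlen
    rw [show 14 * q + (s + 1) = (14 * q + s) + 1 from rfl, pvF_succ, ih (by omega),
        pv_mod_lemma q s hs, hget, pvPartial_succ s hs]
    simp [String.append_assoc]

theorem pv_take_all : pvSample.take 14 = pvSample := rfl

theorem pvF_cycles (q : Nat) :
    pvF (14 * q) = String.join (List.replicate q (String.join (pvSample.map (fun w => w ++ " ")))) := by
  induction q with
  | zero => simp [pvF, String.join]
  | succ k ih =>
    rw [show 14 * (k + 1) = 14 * k + 14 by ring, pvF_split 14 (le_refl _) k, ih,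
        List.replicate_succ', pv_join_append]
    simp [pvPartial, pv_take_all, String.join]

theorem pv_main_nat (m : Nat) :
    pvF m = String.join (List.replicate (m / 14) (String.join (pvSample.map (fun w => w ++ " "))))
      ++ String.join ((pvSample.take (m % 14)).map (fun w => w ++ " ")) := by
  conv_lhs => rw [show m = 14 * (m / 14) + m % 14 by omega]
  rw [pvF_split _ (by omega), pvF_cycles]
  rfl

-- ===== VERDICT (by name: the statement is the Claim_ definition above) =====
theorem generate_test_text_spec : Claim_equal_generate_test_text := by
  intro n _
  unfold Spec_generate_test_text generate_test_text_alt
  by_cases h : n ≤ 0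
  · simp [h, pvA_neg n h]
  · simp only [h, if_false]
    have hn : n = (n.toNat : Int) := by omega
    conv_lhs => rw [hn]
    rw [pvA_eq_pvF, pv_main_nat]
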